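-- pv_equiv track=rewrite | github.com/eurekayuan/cws | eval.py | __model_difficulty_pred
-- ===== SOURCE A (Python) =====
-- def __model_difficulty_pred(pred_chunks, true_chunks, d):
--     d2 = []
--     j = 0
--     for i in range(0, len(pred_chunks)):
--         while true_chunks[j][2] < pred_chunks[i][2]:
--             j += 1
--         d2.append(d[j])
--     return d2
-- ===== SOURCE B (Python) =====
-- def __model_difficulty_pred(pred_chunks, true_chunks, d):
--     ends = [t[2] for t in true_chunks]
--
--     def chunk_idx(end):
--         # the true chunk this prediction falls in: the first one ending at or after it
--         return next(k for k, e in enumerate(ends) if end <= e)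
--
--     return [d[chunk_idx(end)] for _, _, end in pred_chunks]
-- ===== Notes on version B (the rewrite author's own statement) =====
-- stated objective: idiomatic
-- what changed: Replaces A's stateful never-retreating pointer (a nested while loop whose position persists across iterations) with an independent first-index lookup per pred chunk over a precomputed ends list; Pre_ additionally excludes pred lists that are out of order w.r.t. the true segmentation (a later pred chunk falling in an earlier true chunk than a predecessor), where A still returns but its value is inherited from its pointer's leftover position -- chunk lists produced by a segmentation are position-ordered by construction.
-- outside the precondition, e.g. on __model_difficulty_pred([(0, 3, 3), (0, 1, 1)], [(0, 2, 2), (0, 4, 4)], [7, 9]): A returns [9, 9], B returns [9, 7]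
import Mathlib
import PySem

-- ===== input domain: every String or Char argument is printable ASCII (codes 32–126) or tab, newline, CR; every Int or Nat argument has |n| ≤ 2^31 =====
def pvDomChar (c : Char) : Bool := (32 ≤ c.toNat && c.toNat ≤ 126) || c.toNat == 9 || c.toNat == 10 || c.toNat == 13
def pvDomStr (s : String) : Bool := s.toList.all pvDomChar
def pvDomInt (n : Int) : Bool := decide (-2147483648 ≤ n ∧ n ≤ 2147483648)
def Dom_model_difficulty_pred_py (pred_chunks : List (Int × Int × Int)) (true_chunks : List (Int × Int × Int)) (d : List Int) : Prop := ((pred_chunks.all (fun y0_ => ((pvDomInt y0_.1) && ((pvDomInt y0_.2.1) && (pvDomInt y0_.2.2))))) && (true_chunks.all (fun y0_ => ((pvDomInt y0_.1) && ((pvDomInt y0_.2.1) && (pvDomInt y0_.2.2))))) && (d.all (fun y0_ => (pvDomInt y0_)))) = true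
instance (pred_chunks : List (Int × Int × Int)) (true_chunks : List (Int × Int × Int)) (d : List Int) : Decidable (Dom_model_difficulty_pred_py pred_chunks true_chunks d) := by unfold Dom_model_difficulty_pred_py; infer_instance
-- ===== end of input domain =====

-- B replaces A's stateful pointer scan by an independent first-index lookup per pred chunk
-- over the precomputed list of true-chunk ends (idiomatic rewrite; values agree on Pre_).

-- ===== PORT A =====
-- A's inner `while true_chunks[j][2] < pred_chunks[i][2]: j += 1`; the `j < length` test is a
-- totality guard only (Python raises IndexError there; Pre_ excludes those inputs).
def pvAdvance (true_chunks : List (Int × Int × Int)) (v : Int) (j : Nat) : Nat :=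
  if _h : j < true_chunks.length then
    if (true_chunks.getD j (0, 0, 0)).2.2 < v then pvAdvance true_chunks v (j + 1) else j
  else j
termination_by true_chunks.length - j
decreasing_by omega

def model_difficulty_pred_py (pred_chunks : List (Int × Int × Int)) (true_chunks : List (Int × Int × Int)) (d : List Int) : List Int :=
  (pred_chunks.foldl (fun (st : List Int × Nat) p =>
      let j := pvAdvance true_chunks p.2.2 st.2
      (st.1 ++ [d.getD j 0], j)) ([], 0)).1

-- ===== PORT B =====
-- Source B: ends built once; `next(k for k, e in enumerate(ends) if end <= e)` is List.findIdx
-- (Python raises StopIteration / IndexError where findIdx falls off the end — those inputs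
-- are excluded by Pre_), and the outer comprehension is List.map.
def model_difficulty_pred_py_alt (pred_chunks : List (Int × Int × Int)) (true_chunks : List (Int × Int × Int)) (d : List Int) : List Int :=
  let ends := true_chunks.map (fun t => t.2.2)
  pred_chunks.map (fun p => d.getD (ends.findIdx (fun e => p.2.2 ≤ e)) 0)

-- ===== PRECONDITION & SPEC =====
-- Pre_ excludes (a) the inputs on which A raises IndexError (its scan runs past true_chunks
-- or past d: excluded by requiring, for every pred end, an in-range true end bounding it),
-- and (b) pred lists out of order w.r.t. the true segmentation — a later pred chunk falls in
-- an EARLIER true chunk than some predecessor (first clause: whenever a true end k bounds the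
-- later pred end, some true end at or before k bounds the earlier one).  There A still
-- returns, but the value comes from leftover pointer state of its never-retreating scan;
-- chunk lists produced by a segmentation are position-ordered, so that order is A's accident.
def Pre_model_difficulty_pred_py (pred_chunks : List (Int × Int × Int)) (true_chunks : List (Int × Int × Int)) (d : List Int) : Prop :=
  List.Pairwise (fun a b => ∀ k < true_chunks.length,
      b.2.2 ≤ (true_chunks.getD k (0, 0, 0)).2.2 →
        ∃ k' ≤ k, a.2.2 ≤ (true_chunks.getD k' (0, 0, 0)).2.2) pred_chunks ∧
    ∀ p ∈ pred_chunks, ∃ k < true_chunks.length, k < d.length ∧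
      p.2.2 ≤ (true_chunks.getD k (0, 0, 0)).2.2
instance (pred_chunks : List (Int × Int × Int)) (true_chunks : List (Int × Int × Int)) (d : List Int) : Decidable (Pre_model_difficulty_pred_py pred_chunks true_chunks d) := by unfold Pre_model_difficulty_pred_py; infer_instance

def pvWitness_model_difficulty_pred_py : (List (Int × Int × Int)) × (List (Int × Int × Int)) × List Int :=
  ([(0, 2, 2), (2, 4, 4)], ([(0, 3, 3), (3, 5, 5)], [7, 9]))

def Spec_model_difficulty_pred_py (pred_chunks : List (Int × Int × Int)) (true_chunks : List (Int × Int × Int)) (d : List Int) (out : List Int) : Prop := out = model_difficulty_pred_py_alt pred_chunks true_chunks d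
instance (pred_chunks : List (Int × Int × Int)) (true_chunks : List (Int × Int × Int)) (d : List Int) (out : List Int) : Decidable (Spec_model_difficulty_pred_py pred_chunks true_chunks d out) := by unfold Spec_model_difficulty_pred_py; infer_instance

-- ===== CLAIM =====
def Claim_equal_model_difficulty_pred_py : Prop := ∀ (pred_chunks : List (Int × Int × Int)) (true_chunks : List (Int × Int × Int)) (d : List Int), Dom_model_difficulty_pred_py pred_chunks true_chunks d → Pre_model_difficulty_pred_py pred_chunks true_chunks d → Spec_model_difficulty_pred_py pred_chunks true_chunks d (model_difficulty_pred_py pred_chunks true_chunks d)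

-- ===== LEMMAS AND PROOFS =====

-- first position whose end is ≥ v (length if none): B's per-chunk lookup
def pvIdx (ends : List Int) (v : Int) : Nat := ends.findIdx (fun e => v ≤ e)

theorem pvIdx_le_length (ends : List Int) (v : Int) : pvIdx ends v ≤ ends.length :=
  List.findIdx_le_length

theorem pvIdx_spec_lt (ends : List Int) (v : Int) (k : Nat) (hk : k < pvIdx ends v)
    (hlen : k < ends.length) : ends[k] < v := by
  have := List.not_of_lt_findIdx (p := fun e => decide (v ≤ e)) (xs := ends) hk
  simp only [decide_eq_false_iff_not, not_le] at this
  exact this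

theorem pvIdx_spec_ge (ends : List Int) (v : Int) (h : pvIdx ends v < ends.length) :
    v ≤ ends[pvIdx ends v] := by
  have := List.findIdx_getElem (p := fun e => decide (v ≤ e)) (xs := ends) (w := h)
  simpa using this

theorem pvIdx_le_of (ends : List Int) (v : Int) (i : Nat) (hi : i < ends.length)
    (hp : v ≤ ends[i]) : pvIdx ends v ≤ i := by
  by_contra hlt
  exact absurd hp (not_le.mpr (pvIdx_spec_lt ends v i (by omega) hi))

theorem pvEnds_getD (tc : List (Int × Int × Int)) (i : Nat) (hi : i < tc.length) :
    (tc.map (fun t => t.2.2)).getD i 0 = (tc.getD i (0, 0, 0)).2.2 := by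
  rw [List.getD_eq_getElem _ 0 (by simpa using hi), List.getD_eq_getElem tc (0, 0, 0) hi,
    List.getElem_map]

-- the in-order condition of Pre_ makes the lookup positions nondecreasing
theorem pvIdx_mono_rel (tc : List (Int × Int × Int)) (a b : Int)
    (h : ∀ k < tc.length, b ≤ (tc.getD k (0, 0, 0)).2.2 →
        ∃ k' ≤ k, a ≤ (tc.getD k' (0, 0, 0)).2.2) :
    pvIdx (tc.map (fun t => t.2.2)) a ≤ pvIdx (tc.map (fun t => t.2.2)) b := by
  by_cases hb : pvIdx (tc.map (fun t => t.2.2)) b < (tc.map (fun t => t.2.2)).length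
  · have hbl : pvIdx (tc.map (fun t => t.2.2)) b < tc.length := by simpa using hb
    have hvb := pvIdx_spec_ge (tc.map (fun t => t.2.2)) b hb
    rw [← List.getD_eq_getElem _ 0 hb, pvEnds_getD tc _ hbl] at hvb
    obtain ⟨k', hk'le, hk'⟩ := h _ hbl hvb
    have hk'l : k' < tc.length := by omega
    have hk'lm : k' < (tc.map (fun t => t.2.2)).length := by simpa using hk'l
    have : a ≤ (tc.map (fun t => t.2.2))[k'] := by
      rw [← List.getD_eq_getElem _ 0 hk'lm, pvEnds_getD tc _ hk'l]
      exact hk'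
    have := pvIdx_le_of (tc.map (fun t => t.2.2)) a k' hk'lm this
    omega
  · have h1 := pvIdx_le_length (tc.map (fun t => t.2.2)) a
    omega

-- A's while loop, started at or before the first end ≥ v, stops exactly there
theorem pvAdvance_eq (tc : List (Int × Int × Int)) (v : Int) (j : Nat)
    (hj : j ≤ pvIdx (tc.map (fun t => t.2.2)) v) :
    pvAdvance tc v j = pvIdx (tc.map (fun t => t.2.2)) v := by
  unfold pvAdvance
  by_cases h1 : j < tc.length
  · have hjl : j < (tc.map (fun t => t.2.2)).length := by simpa using h1
    have hgd : (tc.getD j (0, 0, 0)).2.2 = (tc.map (fun t => t.2.2))[j]'hjl := by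
      rw [List.getD_eq_getElem tc (0, 0, 0) h1, List.getElem_map]
    rw [dif_pos h1, hgd]
    by_cases he : j = pvIdx (tc.map (fun t => t.2.2)) v
    · subst he
      have h3 := pvIdx_spec_ge (tc.map (fun t => t.2.2)) v hjl
      rw [if_neg (by omega)]
    · rw [if_pos ?cond]
      case cond =>
        by_contra hc
        rw [not_lt] at hc
        have := pvIdx_le_of (tc.map (fun t => t.2.2)) v j hjl hc
        omega
      exact pvAdvance_eq tc v (j + 1) (by omega)
  · rw [dif_neg h1]
    have h2 := pvIdx_le_length (tc.map (fun t => t.2.2)) v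
    simp only [List.length_map] at h2
    omega
termination_by tc.length - j
decreasing_by omega

-- A's fold, started at a pointer at or below every upcoming lookup position, appends
-- exactly B's per-chunk lookups
theorem pvFold_eq (pred tc : List (Int × Int × Int)) (d : List Int) (acc : List Int) (j : Nat)
    (hpw : pred.Pairwise (fun a b => ∀ k < tc.length,
        b.2.2 ≤ (tc.getD k (0, 0, 0)).2.2 →
          ∃ k' ≤ k, a.2.2 ≤ (tc.getD k' (0, 0, 0)).2.2))
    (hrel : ∀ p ∈ pred, j ≤ pvIdx (tc.map (fun t => t.2.2)) p.2.2) :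
    (pred.foldl (fun (st : List Int × Nat) p =>
        let j := pvAdvance tc p.2.2 st.2
        (st.1 ++ [d.getD j 0], j)) (acc, j)).1 =
      acc ++ pred.map (fun p => d.getD (pvIdx (tc.map (fun t => t.2.2)) p.2.2) 0) := by
  induction pred generalizing acc j with
  | nil => simp
  | cons p rest ih =>
    rcases List.pairwise_cons.mp hpw with ⟨hp, hpw'⟩
    simp only [List.foldl_cons, List.map_cons]
    rw [pvAdvance_eq tc p.2.2 j (hrel p (List.mem_cons_self))]
    rw [ih (acc ++ [d.getD (pvIdx (tc.map (fun t => t.2.2)) p.2.2) 0])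
      (pvIdx (tc.map (fun t => t.2.2)) p.2.2) hpw'
      (fun q hq => pvIdx_mono_rel tc _ _ (hp q hq))]
    simp

-- ===== VERDICT =====
theorem model_difficulty_pred_py_spec : Claim_equal_model_difficulty_pred_py := by
  intro pred tc d _hdom hpre
  unfold Spec_model_difficulty_pred_py model_difficulty_pred_py model_difficulty_pred_py_alt
  rw [pvFold_eq pred tc d [] 0 hpre.1 (fun p _ => Nat.zero_le _)]
  simp [pvIdx]
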